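-- pv_equiv track=rewrite | github.com/DarkMatter314/COL106 | Assignment 1/a1.py | findPositionandDistance
-- ===== SOURCE A (Python) =====
-- class Stack:
--
--     class _Node:
--         __slots__ = ['data','next']
--         def __init__(self, data = None, next=None):
--             self.data = data
--             self.next = next
--
--     def __init__(self) -> None:
--        self.head = None
--
--     def push(self, data):
--         self.head = self._Node(data,self.head)
--
--     def pop(self):
--         if(self.head != None):
--             self.head = self.head.next
--         return
--
--     def is_empty(self) -> bool:
--         if(self.head == None):
--             return True
--         return
--
--     def top(self):
--         if(self.head != None):
--             return self.head.data
--
-- def findPositionandDistance(P):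
--     stack = Stack()
--     stack.push(1)
--     x,y,z,d,sign,i = 0,0,0,0,1,2
--     while(i<len(P)):
--         ascii = ord(P[i])
--         if(ascii == 39):
--             i+=1
--             break
--         if(ascii == 40):
--             i+=1
--             continue
--         if(ascii == 41):
--             stack.pop()
--             i+=1
--             continue
--         if(ascii == 43):
--             sign=1
--             i+=1
--             continue
--         if(ascii == 45):
--             sign=-1
--             i+=1
--             continue
--         if(ascii >= 48 and ascii <= 57):
--             numstr = ""
--             while(ord(P[i])>=48 and ord(P[i])<=57):
--                 numstr += P[i]
--                 i+=1
--             stack.push(stack.top()*int(numstr))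
--             continue
--         if(ascii == 88):
--             x += sign*stack.top()
--             d += stack.top()
--             i+=1
--             continue
--         if(ascii == 89):
--             y += sign*stack.top()
--             d += stack.top()
--             i+=1
--             continue
--         if(ascii == 90):
--             z += sign*stack.top()
--             d += stack.top()
--             i+=1
--             continue
--         else: i+=1
--     return [x,y,z,d]
-- ===== SOURCE B (Python) =====
-- def findPositionandDistance(P):
--     x = y = z = d = 0
--     sign = 1
--
--     def parse(i, mult):
--         nonlocal x, y, z, d, sign
--         while i < len(P):
--             c = P[i]
--             if c == "'":
--                 return i + 1, True
--             if c == '(':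
--                 i += 1
--             elif c == ')':
--                 return i + 1, False
--             elif c == '+':
--                 sign = 1
--                 i += 1
--             elif c == '-':
--                 sign = -1
--                 i += 1
--             elif '0' <= c <= '9':
--                 j = i
--                 while j < len(P) and '0' <= P[j] <= '9':
--                     j += 1
--                 i, done = parse(j, mult * int(P[i:j]))
--                 if done:
--                     return i, True
--             elif c == 'X':
--                 x += sign * mult
--                 d += mult
--                 i += 1
--             elif c == 'Y':
--                 y += sign * mult
--                 d += mult
--                 i += 1
--             elif c == 'Z':
--                 z += sign * mult
--                 d += mult
--                 i += 1
--             else: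
--                 i += 1
--         return i, False
--
--     parse(2, 1)
--     return [x, y, z, d]
-- ===== Notes on version B (the rewrite author's own statement) =====
-- stated objective: alternative
-- what changed: A's explicit linked-list Stack of multipliers driven by an index while-loop is replaced by a recursive-descent parser whose call stack holds the nested multipliers (one recursive call per digit-run group, returning at the matching ')').
import Mathlib
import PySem

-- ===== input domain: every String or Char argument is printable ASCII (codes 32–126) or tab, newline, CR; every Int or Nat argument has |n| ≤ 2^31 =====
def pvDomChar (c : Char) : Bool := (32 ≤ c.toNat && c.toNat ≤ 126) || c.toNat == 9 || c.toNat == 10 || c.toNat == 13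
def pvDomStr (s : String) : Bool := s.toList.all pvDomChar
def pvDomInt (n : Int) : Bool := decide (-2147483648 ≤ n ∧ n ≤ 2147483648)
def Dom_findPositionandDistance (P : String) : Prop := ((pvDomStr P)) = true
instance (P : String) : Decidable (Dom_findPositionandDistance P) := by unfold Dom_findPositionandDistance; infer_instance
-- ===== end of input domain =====

-- B replaces A's explicit multiplier Stack + index while-loop by a recursive-descent parser
-- (one recursive call per nested multiplier group); equal return value wherever A returns.

-- shared digit test (Python: 48 <= ord(c) <= 57, equivalently '0' <= c <= '9')
def pvIsDigit (c : Char) : Bool := 48 ≤ c.toNat && c.toNat ≤ 57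

-- ===== PORT A =====
-- A's while-loop over index i, ported as recursion on the remaining suffix (suffix = P[i:]);
-- the Stack is a List Int (push = cons, pop = tail, top = headD; Python's top() on an empty
-- stack returns None and A then raises — those inputs are outside Pre_, so headD's default is
-- never reached there).  In the digit branch c is a digit, so numstr = c :: (digits of rest)
-- and the loop resumes after that run.
def pvLoopA : List Char → List Int → Int → Int → Int → Int → Int → List Int
  | [], _, _, x, y, z, d => [x, y, z, d]
  | c :: rest, stack, sign, x, y, z, d =>
    if c.toNat = 39 then [x, y, z, d]
    else if c.toNat = 40 then pvLoopA rest stack sign x y z d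
    else if c.toNat = 41 then pvLoopA rest stack.tail sign x y z d
    else if c.toNat = 43 then pvLoopA rest stack 1 x y z d
    else if c.toNat = 45 then pvLoopA rest stack (-1) x y z d
    else if pvIsDigit c then
      let numstr := c :: rest.takeWhile pvIsDigit
      let n := (PySem.Int.ofStr? (String.mk numstr)).getD 0
      pvLoopA (rest.dropWhile pvIsDigit) (stack.headD 0 * n :: stack) sign x y z d
    else if c.toNat = 88 then pvLoopA rest stack sign (x + sign * stack.headD 0) y z (d + stack.headD 0)
    else if c.toNat = 89 then pvLoopA rest stack sign x (y + sign * stack.headD 0) z (d + stack.headD 0)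
    else if c.toNat = 90 then pvLoopA rest stack sign x y (z + sign * stack.headD 0) (d + stack.headD 0)
    else pvLoopA rest stack sign x y z d
termination_by l => l.length
decreasing_by
  all_goals simp
  · exact List.length_dropWhile_le _ _

def findPositionandDistance (P : String) : List Int :=
  pvLoopA (P.toList.drop 2) [1] 1 0 0 0 0

-- ===== PORT B =====
-- Source B's parse(i, mult): walks the suffix with the current multiplier, recursing on each digit
-- run; returns (remaining suffix, done?, sign, x, y, z, d).  The subtype part r.1.length ≤ L.length
-- is only a termination artifact.
def pvParseB (L : List Char) (mult sign x y z d : Int) :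
    {r : List Char × Bool × Int × Int × Int × Int × Int // r.1.length ≤ L.length} :=
  match L with
  | [] => ⟨([], false, sign, x, y, z, d), by simp⟩
  | c :: rest =>
    if c = '\'' then ⟨(rest, true, sign, x, y, z, d), by simp⟩
    else if c = '(' then
      let r := pvParseB rest mult sign x y z d
      ⟨r.val, Nat.le_succ_of_le r.property⟩
    else if c = ')' then ⟨(rest, false, sign, x, y, z, d), by simp⟩
    else if c = '+' then
      let r := pvParseB rest mult 1 x y z d
      ⟨r.val, Nat.le_succ_of_le r.property⟩
    else if c = '-' then
      let r := pvParseB rest mult (-1) x y z d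
      ⟨r.val, Nat.le_succ_of_le r.property⟩
    else if pvIsDigit c then
      let numstr := c :: rest.takeWhile pvIsDigit
      let n := (PySem.Int.ofStr? (String.mk numstr)).getD 0
      let r1 := pvParseB (rest.dropWhile pvIsDigit) (mult * n) sign x y z d
      if r1.val.2.1 then
        ⟨(r1.val.1, true, r1.val.2.2),
          Nat.le_succ_of_le (le_trans r1.property (List.length_dropWhile_le _ _))⟩
      else
        have hb : r1.val.1.length ≤ rest.length :=
          le_trans r1.property (List.length_dropWhile_le _ _)
        let r2 := pvParseB r1.val.1 mult r1.val.2.2.1 r1.val.2.2.2.1 r1.val.2.2.2.2.1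
          r1.val.2.2.2.2.2.1 r1.val.2.2.2.2.2.2
        ⟨r2.val, Nat.le_succ_of_le (le_trans r2.property hb)⟩
    else if c = 'X' then
      let r := pvParseB rest mult sign (x + sign * mult) y z (d + mult)
      ⟨r.val, Nat.le_succ_of_le r.property⟩
    else if c = 'Y' then
      let r := pvParseB rest mult sign x (y + sign * mult) z (d + mult)
      ⟨r.val, Nat.le_succ_of_le r.property⟩
    else if c = 'Z' then
      let r := pvParseB rest mult sign x y (z + sign * mult) (d + mult)
      ⟨r.val, Nat.le_succ_of_le r.property⟩
    else
      let r := pvParseB rest mult sign x y z d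
      ⟨r.val, Nat.le_succ_of_le r.property⟩
termination_by L.length
decreasing_by
  all_goals simp
  · exact List.length_dropWhile_le _ _
  · exact hb

def findPositionandDistance_alt (P : String) : List Int :=
  match (pvParseB (P.toList.drop 2) 1 1 0 0 0 0).val with
  | (_, _, _, x, y, z, d) => [x, y, z, d]

-- ===== PRECONDITION & SPEC =====
-- pvPreOk scans the characters once, tracking only the depth of A's multiplier stack and whether
-- the previous character belonged to a digit run (like a balanced-parentheses check): A raises
-- exactly when a digit run reaches the end of the string (IndexError) or when a digit run or an
-- X/Y/Z is met with an empty stack, i.e. after more ')' than pushed multipliers (TypeError).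
def pvPreOk : List Char → Nat → Bool → Bool
  | [], _, inRun => !inRun
  | c :: rest, depth, inRun =>
    if pvIsDigit c then
      (inRun || decide (0 < depth)) && pvPreOk rest depth true
    else
      let depth' := if inRun then depth + 1 else depth
      if c.toNat = 39 then true
      else if c.toNat = 41 then pvPreOk rest (depth' - 1) false
      else if c.toNat = 88 ∨ c.toNat = 89 ∨ c.toNat = 90 then
        decide (0 < depth') && pvPreOk rest depth' false
      else pvPreOk rest depth' false

-- Pre_ holds exactly on the inputs where the Python A returns normally (only inputs where A raises are excluded).
def Pre_findPositionandDistance (P : String) : Prop := pvPreOk (P.toList.drop 2) 1 false = true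
instance (P : String) : Decidable (Pre_findPositionandDistance P) := by unfold Pre_findPositionandDistance; infer_instance

def pvWitness_findPositionandDistance : String := "(M3X+2Y)'"

def Spec_findPositionandDistance (P : String) (out : List Int) : Prop := out = findPositionandDistance_alt P
instance (P : String) (out : List Int) : Decidable (Spec_findPositionandDistance P out) := by unfold Spec_findPositionandDistance; infer_instance

-- ===== CLAIM (what is proved, stated in full; the proofs are below) =====
def Claim_equal_findPositionandDistance : Prop := ∀ (P : String), Dom_findPositionandDistance P → Pre_findPositionandDistance P → Spec_findPositionandDistance P (findPositionandDistance P)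
-- ===== LEMMAS AND PROOFS =====

lemma pvChar_eq_iff (c d : Char) : c = d ↔ c.toNat = d.toNat := by
  constructor
  · rintro rfl; rfl
  · intro h
    apply Char.ext
    apply UInt32.toBitVec_inj.mp
    apply BitVec.toNat_inj.mp
    exact h

-- With headD-default 0, a stack of zeros contributes nothing: A's loop returns the state unchanged.
lemma pvLoopA_zero_stack : ∀ (n : Nat) (L : List Char), L.length ≤ n →
    ∀ (stack : List Int) (s x y z d : Int),
    (∀ m ∈ stack, m = 0) → pvLoopA L stack s x y z d = [x, y, z, d] := by
  intro n
  induction n with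
  | zero =>
    intro L hL stack s x y z d _
    cases L with
    | nil => rw [pvLoopA]
    | cons c rest => simp at hL
  | succ n ih =>
    intro L hL stack s x y z d hz
    match L with
    | [] => rw [pvLoopA]
    | c :: rest =>
      have hr : rest.length ≤ n := by simp at hL; omega
      have hd : (rest.dropWhile pvIsDigit).length ≤ n :=
        le_trans (List.length_dropWhile_le _ _) hr
      have h0 : stack.headD 0 = 0 := by
        cases stack with
        | nil => rfl
        | cons a t => exact hz a (by simp)
      rw [pvLoopA]
      split_ifs with h1 h2 h3 h4 h5 h6 h7 h8 h9
      · rfl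
      · exact ih rest hr stack s x y z d hz
      · exact ih rest hr stack.tail s x y z d (fun m hm => hz m (List.mem_of_mem_tail hm))
      · exact ih rest hr stack 1 x y z d hz
      · exact ih rest hr stack (-1) x y z d hz
      · rw [h0]
        refine ih _ hd _ s x y z d ?_
        intro m hm
        rcases List.mem_cons.mp hm with h | h
        · simp [h]
        · exact hz m h
      · rw [h0]; simpa using ih rest hr stack s (x + s * 0) y z (d + 0) hz
      · rw [h0]; simpa using ih rest hr stack s x (y + s * 0) z (d + 0) hz
      · rw [h0]; simpa using ih rest hr stack s x y (z + s * 0) (d + 0) hz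
      · exact ih rest hr stack s x y z d hz

-- The key correspondence: A's loop with top multiplier m equals B's parse with mult m,
-- followed (on a ')' return) by A's loop on the popped stack.
lemma pvLoopA_eq_parse : ∀ (n : Nat) (L : List Char), L.length ≤ n →
    ∀ (m : Int) (rst : List Int) (s x y z d : Int),
    pvLoopA L (m :: rst) s x y z d =
      (match (pvParseB L m s x y z d).val with
       | (_, true, _, x', y', z', d') => [x', y', z', d']
       | (L', false, s', x', y', z', d') => pvLoopA L' rst s' x' y' z' d') := by
  intro n
  induction n with
  | zero =>
    intro L hL m rst s x y z d
    cases L with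
    | nil => simp [pvLoopA, pvParseB]
    | cons c rest => simp at hL
  | succ n ih =>
    intro L hL m rst s x y z d
    match L with
    | [] => simp [pvLoopA, pvParseB]
    | c :: rest =>
      have hr : rest.length ≤ n := by simp at hL; omega
      have hd : (rest.dropWhile pvIsDigit).length ≤ n :=
        le_trans (List.length_dropWhile_le _ _) hr
      rw [pvLoopA, pvParseB]
      by_cases h1 : c = '\''
      · simp [h1]
      have n1 : ¬ c.toNat = 39 := fun h => h1 ((pvChar_eq_iff c '\'').mpr h)
      by_cases h2 : c = '('
      · simp only [h2, if_true]
        exact ih rest hr m rst s x y z d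
      have n2 : ¬ c.toNat = 40 := fun h => h2 ((pvChar_eq_iff c '(').mpr h)
      by_cases h3 : c = ')'
      · simp [h3]
      have n3 : ¬ c.toNat = 41 := fun h => h3 ((pvChar_eq_iff c ')').mpr h)
      by_cases h4 : c = '+'
      · simp only [h4, if_true]
        exact ih rest hr m rst 1 x y z d
      have n4 : ¬ c.toNat = 43 := fun h => h4 ((pvChar_eq_iff c '+').mpr h)
      by_cases h5 : c = '-'
      · simp only [h5, if_true]
        exact ih rest hr m rst (-1) x y z d
      have n5 : ¬ c.toNat = 45 := fun h => h5 ((pvChar_eq_iff c '-').mpr h)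
      by_cases h6 : pvIsDigit c = true
      · simp only [h1, n1, h2, n2, h3, n3, h4, n4, h5, n5, h6, if_true, if_false]
        rw [ih (rest.dropWhile pvIsDigit) hd _ (m :: rst) s x y z d]
        simp only [apply_ite Subtype.val]
        rcases hr1 : (pvParseB (rest.dropWhile pvIsDigit)
            (m * (PySem.Int.ofStr? (String.mk (c :: rest.takeWhile pvIsDigit))).getD 0)
            s x y z d).val with ⟨L1, done1, s1, x1, y1, z1, d1⟩
        simp only [List.headD_cons, hr1]
        have hp1 := (pvParseB (rest.dropWhile pvIsDigit)
            (m * (PySem.Int.ofStr? (String.mk (c :: rest.takeWhile pvIsDigit))).getD 0)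
            s x y z d).property
        rw [hr1] at hp1
        simp only at hp1
        cases done1
        · simp only [Bool.false_eq_true, if_false]
          rw [ih L1 (le_trans hp1 hd) m rst s1 x1 y1 z1 d1]
        · simp
      have n6 : pvIsDigit c ≠ true := h6
      by_cases h7 : c = 'X'
      · simp only [h7, if_true, List.headD_cons]
        exact ih rest hr m rst s (x + s * m) y z (d + m)
      have n7 : ¬ c.toNat = 88 := fun h => h7 ((pvChar_eq_iff c 'X').mpr h)
      by_cases h8 : c = 'Y'
      · simp only [h8, if_true, List.headD_cons]
        exact ih rest hr m rst s x (y + s * m) z (d + m)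
      have n8 : ¬ c.toNat = 89 := fun h => h8 ((pvChar_eq_iff c 'Y').mpr h)
      by_cases h9 : c = 'Z'
      · simp only [h9, if_true, List.headD_cons]
        exact ih rest hr m rst s x y (z + s * m) (d + m)
      have n9 : ¬ c.toNat = 90 := fun h => h9 ((pvChar_eq_iff c 'Z').mpr h)
      simp only [h1, n1, h2, n2, h3, n3, h4, n4, h5, n5, n6, h7, n7, h8, n8, h9, n9, if_false]
      exact ih rest hr m rst s x y z d

-- ===== VERDICT (by name: the statement is the Claim_ definition above) =====
theorem findPositionandDistance_spec : Claim_equal_findPositionandDistance := by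
  intro P _ _
  unfold Spec_findPositionandDistance findPositionandDistance findPositionandDistance_alt
  rw [pvLoopA_eq_parse (P.toList.drop 2).length _ le_rfl]
  rcases h : (pvParseB (P.toList.drop 2) 1 1 0 0 0 0).val with ⟨L', done, s', x', y', z', d'⟩
  cases done
  · simp [pvLoopA_zero_stack L'.length L' le_rfl [] s' x' y' z' d' (by simp)]
  · simp
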